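-- pv_equiv track=rewrite | github.com/PedroLuvaz/Atividade-Rainhas | Algoritmos/astar_solver.py | heuristica
-- ===== SOURCE A (Python) =====
-- def heuristica(rainhas, linha, n, bloqueios):
--     """
--     Heurística melhorada para o problema das N-Rainhas.
--     Calcula o número de linhas restantes que ainda podem ser atacadas pelas rainhas já colocadas.
--     """
--     ataques = set()
--     for l, c in rainhas:
--         # Adicionar ataques horizontais, diagonais principais e secundárias
--         for i in range(linha, n):
--             ataques.add((i, c))  # mesma coluna
--             ataques.add((i, c + (i - l)))  # diagonal principal
--             ataques.add((i, c - (i - l)))  # diagonal secundária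
--
--     # Contar as linhas restantes que não podem receber rainhas
--     count = 0
--     for l in range(linha, n):
--         if all((l, c) in ataques or (l, c) in bloqueios for c in range(n)):
--             count += 1
--     return count
-- ===== SOURCE B (Python) =====
-- def heuristica(rainhas, linha, n, bloqueios):
--     # No attack set at all: a cell (l, c) is covered iff it is blocked or some
--     # queen attacks it, decided arithmetically per queen.
--     bset = set(bloqueios)
--     def covered(l, c):
--         return (l, c) in bset or any(
--             c == qc or c - qc == l - ql or qc - c == l - ql for ql, qc in rainhas)
--     return sum(1 for l in range(linha, n) if all(covered(l, c) for c in range(n)))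
-- ===== Notes on version B (the rewrite author's own statement) =====
-- stated objective: simpler
-- what changed: B drops A's materialised global set of all attacked (row,col) pairs entirely: it counts with a single comprehension the rows whose every column is blocked or arithmetically attacked by some queen (c == qc or |c-qc| matches the row distance), testing each cell directly against the queens.
import Mathlib
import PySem

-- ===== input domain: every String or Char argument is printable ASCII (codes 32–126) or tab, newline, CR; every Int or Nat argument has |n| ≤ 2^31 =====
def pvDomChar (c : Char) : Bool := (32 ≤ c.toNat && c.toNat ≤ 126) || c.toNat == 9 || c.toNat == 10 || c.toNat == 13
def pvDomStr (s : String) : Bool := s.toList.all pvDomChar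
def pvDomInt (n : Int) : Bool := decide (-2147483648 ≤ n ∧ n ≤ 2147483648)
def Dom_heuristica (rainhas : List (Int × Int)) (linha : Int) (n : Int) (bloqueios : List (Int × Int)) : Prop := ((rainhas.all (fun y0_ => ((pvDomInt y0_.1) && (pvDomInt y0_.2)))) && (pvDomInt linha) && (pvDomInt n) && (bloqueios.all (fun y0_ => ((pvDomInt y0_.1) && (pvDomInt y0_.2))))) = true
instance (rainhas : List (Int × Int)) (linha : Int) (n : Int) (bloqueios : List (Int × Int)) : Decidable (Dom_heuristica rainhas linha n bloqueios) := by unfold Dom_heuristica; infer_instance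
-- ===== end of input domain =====

-- B replaces A's materialised global attack set by a direct countP of the rows whose
-- every column is blocked or arithmetically attacked by some queen; same value, no set of pairs built.


-- ===== PORT A =====
-- ataques = set(); for l,c in rainhas: for i in range(linha,n): add (i,c),(i,c+(i-l)),(i,c-(i-l))
def pvAtaques (rainhas : List (Int × Int)) (linha n : Int) : PySem.Set (Int × Int) :=
  rainhas.foldl (fun s q =>
    (PySem.List.pyRange linha n 1).foldl (fun s i =>
      PySem.Set.add (PySem.Set.add (PySem.Set.add s (i, q.2)) (i, q.2 + (i - q.1))) (i, q.2 - (i - q.1))) s)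
    PySem.Set.empty

def heuristica (rainhas : List (Int × Int)) (linha : Int) (n : Int) (bloqueios : List (Int × Int)) : Int :=
  let ataques := pvAtaques rainhas linha n
  (PySem.List.pyRange linha n 1).foldl (fun count l =>
    if (PySem.List.pyRange 0 n 1).all (fun c =>
        PySem.Set.contains ataques (l, c) || bloqueios.contains (l, c))
    then count + 1 else count) 0

-- ===== PORT B =====
-- covered(l,c): (l,c) in set(bloqueios) or some queen attacks cell (l,c) arithmetically;
-- result = sum(1 for l in range(linha,n) if all(covered(l,c) for c in range(n))) = countP
def heuristica_alt (rainhas : List (Int × Int)) (linha : Int) (n : Int) (bloqueios : List (Int × Int)) : Int :=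
  let bset := PySem.Set.ofList bloqueios
  Int.ofNat ((PySem.List.pyRange linha n 1).countP (fun l =>
    (PySem.List.pyRange 0 n 1).all (fun c =>
      PySem.Set.contains bset (l, c) ||
      rainhas.any (fun q => c == q.2 || c - q.2 == l - q.1 || q.2 - c == l - q.1))))

-- ===== PRECONDITION & SPEC =====
def Spec_heuristica (rainhas : List (Int × Int)) (linha : Int) (n : Int) (bloqueios : List (Int × Int)) (out : Int) : Prop := out = heuristica_alt rainhas linha n bloqueios
instance (rainhas : List (Int × Int)) (linha : Int) (n : Int) (bloqueios : List (Int × Int)) (out : Int) : Decidable (Spec_heuristica rainhas linha n bloqueios out) := by unfold Spec_heuristica; infer_instance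

-- ===== CLAIM (what is proved, stated in full; the proofs are below) =====
def Claim_equal_heuristica : Prop := ∀ (rainhas : List (Int × Int)) (linha : Int) (n : Int) (bloqueios : List (Int × Int)), Dom_heuristica rainhas linha n bloqueios → Spec_heuristica rainhas linha n bloqueios (heuristica rainhas linha n bloqueios)

-- ===== LEMMAS AND PROOFS =====

-- membership in A's attack set
theorem mem_ataques_inner (q : Int × Int) (rows : List Int) (s : PySem.Set (Int × Int)) (x : Int × Int) :
    x ∈ rows.foldl (fun s i =>
      PySem.Set.add (PySem.Set.add (PySem.Set.add s (i, q.2)) (i, q.2 + (i - q.1))) (i, q.2 - (i - q.1))) s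
    ↔ x ∈ s ∨ ∃ i ∈ rows, x = (i, q.2) ∨ x = (i, q.2 + (i - q.1)) ∨ x = (i, q.2 - (i - q.1)) := by
  induction rows generalizing s with
  | nil => simp
  | cons r rs ih =>
    rw [List.foldl_cons, ih]
    simp only [PySem.Set.mem_add, List.mem_cons]
    aesop

theorem mem_pvAtaques (rainhas : List (Int × Int)) (linha n : Int) (x : Int × Int) :
    x ∈ pvAtaques rainhas linha n ↔
      ∃ q ∈ rainhas, ∃ i ∈ PySem.List.pyRange linha n 1,
        x = (i, q.2) ∨ x = (i, q.2 + (i - q.1)) ∨ x = (i, q.2 - (i - q.1)) := by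
  unfold pvAtaques
  have gen : ∀ (qs : List (Int × Int)) (s : PySem.Set (Int × Int)),
      x ∈ qs.foldl (fun s q =>
        (PySem.List.pyRange linha n 1).foldl (fun s i =>
          PySem.Set.add (PySem.Set.add (PySem.Set.add s (i, q.2)) (i, q.2 + (i - q.1))) (i, q.2 - (i - q.1))) s) s
      ↔ x ∈ s ∨ ∃ q ∈ qs, ∃ i ∈ PySem.List.pyRange linha n 1,
          x = (i, q.2) ∨ x = (i, q.2 + (i - q.1)) ∨ x = (i, q.2 - (i - q.1)) := by
    intro qs
    induction qs with
    | nil => simp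
    | cons q qs ih =>
      intro s
      rw [List.foldl_cons, ih, mem_ataques_inner]
      simp only [List.mem_cons]
      aesop
  simpa using gen rainhas PySem.Set.empty

-- A's counting foldl is a countP (plus the accumulator)
theorem foldl_count_eq (p : Int → Bool) (L : List Int) (acc : Int) :
    L.foldl (fun count l => if p l then count + 1 else count) acc
      = acc + Int.ofNat (L.countP p) := by
  induction L generalizing acc with
  | nil => simp
  | cons l L ih =>
    rw [List.foldl_cons, ih, List.countP_cons]
    by_cases h : p l = true <;> simp [h] <;> omega

-- the two per-row tests agree on rows the loop visits
theorem row_test_eq (rainhas : List (Int × Int)) (linha n : Int) (bloqueios : List (Int × Int))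
    (l : Int) (hl : l ∈ PySem.List.pyRange linha n 1) :
    ((PySem.List.pyRange 0 n 1).all (fun c =>
        PySem.Set.contains (pvAtaques rainhas linha n) (l, c) || bloqueios.contains (l, c)))
    = ((PySem.List.pyRange 0 n 1).all (fun c =>
        PySem.Set.contains (PySem.Set.ofList bloqueios) (l, c) ||
        rainhas.any (fun q => c == q.2 || c - q.2 == l - q.1 || q.2 - c == l - q.1))) := by
  rw [Bool.eq_iff_iff, List.all_eq_true, List.all_eq_true]
  apply forall₂_congr
  intro c _
  rw [Bool.or_eq_true, Bool.or_eq_true, PySem.Set.contains_iff, PySem.Set.contains_iff,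
    PySem.Set.mem_ofList, mem_pvAtaques, List.any_eq_true, List.contains_iff_mem]
  constructor
  · rintro (⟨q, hq, i, _, hx⟩ | hb)
    · right
      refine ⟨q, hq, ?_⟩
      rcases hx with hx | hx | hx <;>
        · obtain ⟨hi, hc⟩ := Prod.ext_iff.1 hx
          subst hi
          simp only [Bool.or_eq_true, beq_iff_eq]
          omega
    · left; exact hb
  · rintro (hb | ⟨q, hq, hx⟩)
    · right; exact hb
    · left
      refine ⟨q, hq, l, hl, ?_⟩
      simp only [Bool.or_eq_true, beq_iff_eq] at hx
      simp only [Prod.ext_iff, true_and]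
      omega

-- ===== VERDICT (by name: the statement is the Claim_ definition above) =====
theorem heuristica_spec : Claim_equal_heuristica := by
  intro rainhas linha n bloqueios _
  unfold Spec_heuristica heuristica heuristica_alt
  simp only
  rw [foldl_count_eq, zero_add]
  congr 1
  apply List.countP_congr
  intro l hl
  rw [row_test_eq rainhas linha n bloqueios l hl]
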